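-- pv_equiv track=rewrite | github.com/DialRC/PortalAPI | PortalAPIforPythonFlask/SLUAPI/FeatureExt.py | ExtractEntityClassFromUtter
-- ===== SOURCE A (Python) =====
-- def ExtractEntityClassFromUtter(utterance):
--     #print utterance
--     flag = 0
--     entity_class = ""
--     entity_class_list =[]
--     so = 0
--     eo = 0
--     for i in range(len(utterance)):
--         if utterance[i] == '<' and flag == 0:
--             flag = 1
--             so = i
--         elif utterance[i] == ">" and flag == 1:
--             eo = i
--         elif utterance[i] == '<' and flag == 1:
--             flag = 0
--             #print so+1, eo-so-1
--             #print utterance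
--             entity_class = utterance[so+1: so+1+eo-so-1].strip()
--             entity_class_list.append(entity_class)
--     #print entity_class_list
--     return entity_class_list
-- ===== SOURCE B (Python) =====
-- def ExtractEntityClassFromUtter(utterance):
--     # positions of every '<'; consecutive pairs (open, commit) delimit one tag region
--     opens = [i for i, c in enumerate(utterance) if c == '<']
--     result = []
--     while len(opens) >= 2:
--         p, q = opens[0], opens[1]
--         opens = opens[2:]
--         entity = ''
--         for e in range(q - 1, p, -1):      # last '>' strictly between p and q
--             if utterance[e] == '>':
--                 entity = utterance[p + 1:e].strip()
--                 break
--         result.append(entity)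
--     return result
-- ===== Notes on version B (the rewrite author's own statement) =====
-- stated objective: alternative
-- what changed: Replaces the single-pass flag/so/eo state machine with a two-phase decomposition: first collect all '<' positions, pair them consecutively, then for each (open, commit) pair scan backwards for the last interior '>' and emit the stripped text between.
import Mathlib
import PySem

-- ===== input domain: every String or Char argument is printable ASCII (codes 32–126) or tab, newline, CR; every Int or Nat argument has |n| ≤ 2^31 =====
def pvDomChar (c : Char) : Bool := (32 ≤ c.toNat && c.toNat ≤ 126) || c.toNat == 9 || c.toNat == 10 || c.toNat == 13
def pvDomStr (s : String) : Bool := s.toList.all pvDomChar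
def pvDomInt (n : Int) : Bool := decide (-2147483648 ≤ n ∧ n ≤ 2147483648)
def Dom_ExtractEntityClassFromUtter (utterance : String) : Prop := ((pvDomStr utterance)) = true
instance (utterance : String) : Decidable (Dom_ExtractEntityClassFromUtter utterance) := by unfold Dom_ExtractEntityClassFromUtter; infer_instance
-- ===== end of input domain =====

-- B replaces A's one-pass flag/so/eo state machine by a two-phase decomposition (collect the
-- '<' positions, pair them consecutively, per pair scan backwards for the last interior '>');
-- objective: alternative (same O(n) cost, different algorithm).

-- ===== PORT A =====
-- the body of A's loop on (flag, so, eo, acc) and the pair (i, utterance[i])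
def pvStepE (cs : List Char) (st : Int × Int × Int × List String) (ic : Int × Char) :
    Int × Int × Int × List String :=
  match st, ic with
  | (flag, so, eo, acc), (i, c) =>
    if c = '<' ∧ flag = 0 then (1, i, eo, acc)
    else if c = '>' ∧ flag = 1 then (flag, so, i, acc)
    else if c = '<' ∧ flag = 1 then
      (0, so, eo,
        acc ++ [String.ofList (PySem.Chars.strip
          (PySem.List.slice cs (some (so + 1)) (some (so + 1 + eo - so - 1))))])
    else (flag, so, eo, acc)

def ExtractEntityClassFromUtter (utterance : String) : List String :=
  let cs := utterance.toList
  ((PySem.List.pyRange 0 (PySem.Str.len utterance) 1).foldl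
    (fun st i => pvStepE cs st (i, PySem.List.pyGetD cs i ' ')) (0, 0, 0, [])).2.2.2

-- ===== PORT B =====
-- [i for i, c in enumerate(utterance) if c == '<'], with the start parameter kept explicit
def pvOpens (t : List Char) (s : Int) : List Int :=
  (PySem.List.enumerate t s).filterMap (fun ic => if ic.2 = '<' then some ic.1 else none)

-- the inner 'for e in range(q-1, p, -1): if utterance[e] == ">": … break' loop (es = the range)
def pvInner (cs : List Char) (p : Int) : List Int → String
  | [] => ""
  | e :: es =>
    if PySem.List.pyGetD cs e ' ' = '>' then
      String.ofList (PySem.Chars.strip (PySem.List.slice cs (some (p + 1)) (some e)))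
    else pvInner cs p es

-- the 'while len(opens) >= 2' loop consuming opens two at a time
def pvPairs (cs : List Char) : List Int → List String
  | p :: q :: rest =>
    pvInner cs p (PySem.List.pyRange (q - 1) p (-1)) :: pvPairs cs rest
  | _ => []

def ExtractEntityClassFromUtter_alt (utterance : String) : List String :=
  let cs := utterance.toList
  pvPairs cs (pvOpens cs 0)

-- ===== PRECONDITION & SPEC =====
def Spec_ExtractEntityClassFromUtter (utterance : String) (out : List String) : Prop := out = ExtractEntityClassFromUtter_alt utterance
instance (utterance : String) (out : List String) : Decidable (Spec_ExtractEntityClassFromUtter utterance out) := by unfold Spec_ExtractEntityClassFromUtter; infer_instance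

-- ===== CLAIM (what is proved, stated in full; the proofs are below) =====
def Claim_equal_ExtractEntityClassFromUtter : Prop := ∀ (utterance : String), Dom_ExtractEntityClassFromUtter utterance → Spec_ExtractEntityClassFromUtter utterance (ExtractEntityClassFromUtter utterance)

-- ===== LEMMAS AND PROOFS =====

-- invariant of A's flag = 1 state at position m, region opened at so:
-- either no '>' has been seen since so (eo stale, ≤ so), or eo is the last '>' before m
def pvInv (cs : List Char) (so eo : Int) (m : Nat) : Prop :=
  (0 ≤ eo ∧ eo ≤ so ∧ ∀ j : Nat, so < (j : Int) → j < m → cs[j]? ≠ some '>')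
  ∨ (so < eo ∧ eo < (m : Int) ∧ cs[eo.toNat]? = some '>' ∧
      ∀ j : Nat, eo < (j : Int) → j < m → cs[j]? ≠ some '>')

-- backward scan finds nothing when no '>' lies in (so, r]
lemma pvInner_none (cs : List Char) (so : Int) (hso : 0 ≤ so) :
    ∀ (k : Nat) (r : Int), (r - so).toNat = k → r < (cs.length : Int) →
      (∀ j : Nat, so < (j : Int) → (j : Int) ≤ r → cs[j]? ≠ some '>') →
      pvInner cs so (PySem.List.pyRange r so (-1)) = "" := by
  intro k
  induction k with
  | zero =>
    intro r hk _ _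
    rw [PySem.List.pyRange_neg_one_eq_nil (by omega)]
    rfl
  | succ k ih =>
    intro r hk hr hno
    have hlt : so < r := by omega
    have h0r : 0 ≤ r := by omega
    have hrn : r.toNat < cs.length := by omega
    rw [PySem.List.pyRange_neg_one_cons hlt]
    have hget : PySem.List.pyGetD cs r ' ' = cs[r.toNat] :=
      PySem.List.pyGetD_eq_getElem cs ' ' h0r hr
    have hne : cs[r.toNat] ≠ '>' := by
      have := hno r.toNat (by omega) (by omega)
      simpa [List.getElem?_eq_getElem hrn] using this
    show pvInner cs so (r :: PySem.List.pyRange (r - 1) so (-1)) = ""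
    rw [pvInner, if_neg (by rw [hget]; exact hne)]
    exact ih (r - 1) (by omega) (by omega) (fun j h1 h2 => hno j h1 (by omega))

-- backward scan finds the last '>' at eo when there is one in (so, r]
lemma pvInner_hit (cs : List Char) (so eo : Int) (h0 : 0 ≤ so) (hso : so < eo)
    (hmem : cs[eo.toNat]? = some '>') :
    ∀ (k : Nat) (r : Int), (r - eo).toNat = k → eo ≤ r → r < (cs.length : Int) →
      (∀ j : Nat, eo < (j : Int) → (j : Int) ≤ r → cs[j]? ≠ some '>') →
      pvInner cs so (PySem.List.pyRange r so (-1)) =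
        String.ofList (PySem.Chars.strip (PySem.List.slice cs (some (so + 1)) (some eo))) := by
  intro k
  induction k with
  | zero =>
    intro r hk hle hr _
    have hre : r = eo := by omega
    subst hre
    have h0r : 0 ≤ r := by omega
    have hrn : r.toNat < cs.length := by
      have := List.getElem?_eq_some_iff.mp hmem
      omega
    rw [PySem.List.pyRange_neg_one_cons hso]
    rw [pvInner, if_pos]
    rw [PySem.List.pyGetD_eq_getElem cs ' ' h0r (by omega)]
    have := List.getElem?_eq_some_iff.mp hmem
    exact this.choose_spec
  | succ k ih =>
    intro r hk hle hr hno
    have hlt : eo < r := by omega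
    have h0r : 0 ≤ r := by omega
    have hrn : r.toNat < cs.length := by omega
    rw [PySem.List.pyRange_neg_one_cons (by omega)]
    have hget : PySem.List.pyGetD cs r ' ' = cs[r.toNat] :=
      PySem.List.pyGetD_eq_getElem cs ' ' h0r hr
    have hne : cs[r.toNat] ≠ '>' := by
      have := hno r.toNat (by omega) (by omega)
      simpa [List.getElem?_eq_getElem hrn] using this
    rw [pvInner, if_neg (by rw [hget]; exact hne)]
    exact ih (r - 1) (by omega) (by omega) (by omega) (fun j h1 h2 => hno j h1 (by omega))

-- at a commit at position m, A's emitted string equals B's backward scan of the region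
lemma pvEmit_eq (cs : List Char) (so eo : Int) (m : Nat) (h0 : 0 ≤ so)
    (hlen : m ≤ cs.length) (hinv : pvInv cs so eo m) :
    String.ofList (PySem.Chars.strip
        (PySem.List.slice cs (some (so + 1)) (some (so + 1 + eo - so - 1))))
      = pvInner cs so (PySem.List.pyRange ((m : Int) - 1) so (-1)) := by
  have harith : so + 1 + eo - so - 1 = eo := by ring
  rw [harith]
  rcases hinv with ⟨he0, heso, hno⟩ | ⟨h1, h2, hmem, hno⟩
  · rw [pvInner_none cs so h0 ((((m : Int) - 1) - so).toNat) ((m : Int) - 1) rfl (by omega)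
      (fun j hj1 hj2 => hno j hj1 (by omega))]
    rw [PySem.List.slice_toNat cs (by omega) he0]
    have : eo.toNat - (so + 1).toNat = 0 := by omega
    rw [this]
    rfl
  · rw [pvInner_hit cs so eo h0 h1 hmem ((((m : Int) - 1) - eo).toNat) ((m : Int) - 1) rfl
      (by omega) (by omega) (fun j hj1 hj2 => hno j hj1 (by omega))]

-- the invariant survives a non-'>' character at position m
lemma pvInv_keep (cs : List Char) (so eo : Int) (m : Nat) (c : Char)
    (hc : cs[m]? = some c) (hne : c ≠ '>') (hinv : pvInv cs so eo m) :
    pvInv cs so eo (m + 1) := by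
  have hext : ∀ (b : Int) (hno : ∀ j : Nat, b < (j : Int) → j < m → cs[j]? ≠ some '>'),
      ∀ j : Nat, b < (j : Int) → j < m + 1 → cs[j]? ≠ some '>' := by
    intro b hno j hj1 hj2
    by_cases hjm : j = m
    · subst hjm
      rw [hc]
      intro hcontra
      exact hne (Option.some.inj hcontra)
    · exact hno j hj1 (by omega)
  rcases hinv with ⟨a1, a2, a3⟩ | ⟨b1, b2, b3, b4⟩
  · exact Or.inl ⟨a1, a2, hext so a3⟩
  · exact Or.inr ⟨b1, by omega, b3, hext eo b4⟩

-- the main loop correspondence, over the suffix of cs starting at m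
lemma pvMain (cs : List Char) :
    ∀ (t : List Char) (m : Nat), cs.drop m = t →
    ∀ (so eo : Int) (acc : List String),
      ((0 ≤ eo → eo ≤ (m : Int) →
        ((PySem.List.enumerate t (m : Int)).foldl (pvStepE cs) (0, so, eo, acc)).2.2.2
          = acc ++ pvPairs cs (pvOpens t (m : Int)))
      ∧ (0 ≤ so → so < (m : Int) → pvInv cs so eo m →
        ((PySem.List.enumerate t (m : Int)).foldl (pvStepE cs) (1, so, eo, acc)).2.2.2
          = acc ++ pvPairs cs (so :: pvOpens t (m : Int)))) := by
  intro t
  induction t with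
  | nil =>
    intro m hdrop so eo acc
    constructor
    · intro _ _
      simp [PySem.List.enumerate_nil, pvOpens, pvPairs]
    · intro _ _ _
      simp [PySem.List.enumerate_nil, pvOpens, pvPairs]
  | cons c t' ih =>
    intro m hdrop so eo acc
    have hm : m < cs.length := by
      rcases Nat.lt_or_ge m cs.length with h | h
      · exact h
      · rw [List.drop_eq_nil_of_le h] at hdrop; cases hdrop
    have hsplit : cs.drop m = cs[m] :: cs.drop (m + 1) := List.drop_eq_getElem_cons hm
    rw [hdrop] at hsplit
    have hc : cs[m]? = some c := by
      rw [List.getElem?_eq_getElem hm, Option.some_inj,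
        ((List.cons.injEq _ _ _ _).mp hsplit.symm).1]
    have hdrop' : cs.drop (m + 1) = t' := ((List.cons.injEq _ _ _ _).mp hsplit.symm).2
    have hcast : ((m : Int) + 1) = (((m + 1 : Nat)) : Int) := by push_cast; ring
    have hopens : ∀ s : Int, pvOpens (c :: t') s
        = (if c = '<' then [s] else []) ++ pvOpens t' (s + 1) := by
      intro s
      by_cases h : c = '<' <;> simp [pvOpens, PySem.List.enumerate_cons, h]
    constructor
    · -- flag = 0
      intro he0 hem
      rw [PySem.List.enumerate_cons, List.foldl_cons]
      by_cases hlt : c = '<'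
      · have hstep : pvStepE cs (0, so, eo, acc) ((m : Int), c) = (1, (m : Int), eo, acc) := by
          simp [pvStepE, hlt]
        rw [hstep, hopens, if_pos hlt, hcast]
        have h1 := (ih (m + 1) hdrop' (m : Int) eo acc).2 (by positivity) (by push_cast; omega)
          (Or.inl ⟨he0, hem, fun j hj1 hj2 => absurd (by omega : j < m + 1) (by omega)⟩)
        rw [h1]
        simp
      · have hstep : pvStepE cs (0, so, eo, acc) ((m : Int), c) = (0, so, eo, acc) := by
          simp [pvStepE, hlt]
        rw [hstep, hopens, if_neg hlt, hcast]
        have h1 := (ih (m + 1) hdrop' so eo acc).1 he0 (by push_cast; omega)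
        rw [h1]
        simp
    · -- flag = 1
      intro h0 hm1 hinv
      have heo0 : 0 ≤ eo := by
        rcases hinv with ⟨a1, _, _⟩ | ⟨b1, _, _, _⟩
        · exact a1
        · omega
      rw [PySem.List.enumerate_cons, List.foldl_cons]
      by_cases hlt : c = '<'
      · -- commit
        have hstep : pvStepE cs (1, so, eo, acc) ((m : Int), c)
            = (0, so, eo, acc ++ [String.ofList (PySem.Chars.strip
                (PySem.List.slice cs (some (so + 1)) (some (so + 1 + eo - so - 1))))]) := by
          simp [pvStepE, hlt]
        rw [hstep, hopens, if_pos hlt, hcast]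
        have heom : eo ≤ ((m + 1 : Nat) : Int) := by
          rcases hinv with ⟨_, a2, _⟩ | ⟨_, b2, _, _⟩ <;> push_cast <;> omega
        have h1 := (ih (m + 1) hdrop' so eo
            (acc ++ [String.ofList (PySem.Chars.strip
              (PySem.List.slice cs (some (so + 1)) (some (so + 1 + eo - so - 1))))])).1 heo0 heom
        rw [h1]
        have hemit := pvEmit_eq cs so eo m h0 (le_of_lt hm) hinv
        simp [pvPairs, hemit]
      · by_cases hgt : c = '>'
        · have hstep : pvStepE cs (1, so, eo, acc) ((m : Int), c) = (1, so, (m : Int), acc) := by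
            simp [pvStepE, hgt]
          rw [hstep, hopens, if_neg hlt, hcast]
          have h1 := (ih (m + 1) hdrop' so (m : Int) acc).2 h0 (by push_cast; omega)
            (Or.inr ⟨hm1, by push_cast; omega,
              by rw [show ((m : Int)).toNat = m from Int.toNat_natCast m, hc, hgt],
              fun j hj1 hj2 => absurd (by omega : j < m + 1) (by omega)⟩)
          rw [h1]
          simp
        · have hstep : pvStepE cs (1, so, eo, acc) ((m : Int), c) = (1, so, eo, acc) := by
            simp [pvStepE, hlt, hgt]
          rw [hstep, hopens, if_neg hlt, hcast]
          have h1 := (ih (m + 1) hdrop' so eo acc).2 h0 (by push_cast; omega)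
            (pvInv_keep cs so eo m c hc hgt hinv)
          rw [h1]
          simp

-- ===== VERDICT (by name: the statement is the Claim_ definition above) =====
theorem ExtractEntityClassFromUtter_spec : Claim_equal_ExtractEntityClassFromUtter := by
  intro u _
  show ((PySem.List.pyRange 0 (PySem.Str.len u) 1).foldl
      (fun st i => pvStepE u.toList st (i, PySem.List.pyGetD u.toList i ' ')) (0, 0, 0, [])).2.2.2
    = pvPairs u.toList (pvOpens u.toList 0)
  have h := (pvMain u.toList u.toList 0 rfl 0 0 []).1 le_rfl le_rfl
  rw [PySem.Str.len_eq, show ((u.toList.length : Int)) = PySem.List.len u.toList from rfl,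
    ← List.foldl_map (f := fun j => (j, PySem.List.pyGetD u.toList j ' ')),
    ← PySem.List.enumerate_eq_map_pyRange u.toList ' ']
  simpa using h
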